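-- pv_equiv track=rewrite | github.com/LiuQH-lab/FindSpinGroup | src/findspingroup/structure/group.py | find_uvw_whole_string
-- ===== SOURCE A (Python) =====
-- def find_uvw_whole_string(data_list):
--     """
--     Return the indices of strings containing at least two of `u`, `v`, `w`.
--     """
--     target_chars = {'u', 'v', 'w'}
--     indices = []
--     for index, text in enumerate(data_list):
--         common_chars = set(text) & target_chars
--
--         if len(common_chars) >= 2:
--             indices.append(index)
--
--
--     return indices
-- ===== SOURCE B (Python) =====
-- def _has_two_of_uvw(text):
--     """Single scan of text, tracking which of u/v/w were seen in a bitmask;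
--     stop as soon as two distinct targets have been seen."""
--     mask = 0
--     for c in text:
--         if c == 'u':
--             mask |= 1
--         elif c == 'v':
--             mask |= 2
--         elif c == 'w':
--             mask |= 4
--         if mask in (3, 5, 6, 7):
--             return True
--     return False
--
--
-- def find_uvw_whole_string(data_list):
--     """
--     Return the indices of strings containing at least two of `u`, `v`, `w`.
--     """
--     return [index for index, text in enumerate(data_list) if _has_two_of_uvw(text)]
-- ===== Notes on version B (the rewrite author's own statement) =====
-- stated objective: alternative
-- what changed: B never builds a per-string set or intersects: it scans each string once maintaining a 3-bit seen-mask over u/v/w and short-circuits as soon as two distinct targets have been seen, collecting indices via a comprehension.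
import Mathlib
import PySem

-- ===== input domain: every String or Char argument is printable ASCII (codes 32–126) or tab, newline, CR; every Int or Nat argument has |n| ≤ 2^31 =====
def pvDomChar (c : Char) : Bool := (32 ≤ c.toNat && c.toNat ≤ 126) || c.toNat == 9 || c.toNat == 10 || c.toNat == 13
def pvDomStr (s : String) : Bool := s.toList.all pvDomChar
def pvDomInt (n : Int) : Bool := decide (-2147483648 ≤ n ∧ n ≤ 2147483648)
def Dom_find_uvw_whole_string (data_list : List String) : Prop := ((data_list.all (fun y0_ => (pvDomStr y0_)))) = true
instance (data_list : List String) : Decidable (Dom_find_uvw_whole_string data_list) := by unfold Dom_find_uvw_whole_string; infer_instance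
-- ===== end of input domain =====

-- B replaces A's build-set-then-intersect test by a single short-circuit scan of each string with a 3-bit seen-mask over u/v/w (alternative; same cost).


-- ===== PORT A =====
def find_uvw_whole_string (data_list : List String) : List Int :=
  let target_chars : PySem.Set Char := PySem.Set.ofList ['u', 'v', 'w']
  (PySem.List.enumerate data_list).foldl
    (fun indices p =>
      let common_chars := PySem.Set.inter (PySem.Set.ofList p.2.toList) target_chars
      if 2 ≤ PySem.Set.len common_chars then indices ++ [p.1] else indices)
    []

-- ===== PORT B =====
-- 'mask |= 1 / 2 / 4' depending on the character
def uvwMaskStep (mask : Nat) (c : Char) : Nat :=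
  if c = 'u' then mask ||| 1 else if c = 'v' then mask ||| 2 else if c = 'w' then mask ||| 4 else mask

-- the for-loop of _has_two_of_uvw with early return on 'mask in (3,5,6,7)'
def hasTwoOfUvw (mask : Nat) : List Char → Bool
  | [] => false
  | c :: rest =>
      let m := uvwMaskStep mask c
      if m = 3 ∨ m = 5 ∨ m = 6 ∨ m = 7 then true else hasTwoOfUvw m rest

def find_uvw_whole_string_alt (data_list : List String) : List Int :=
  ((PySem.List.enumerate data_list).filter (fun p => hasTwoOfUvw 0 p.2.toList)).map (fun p => p.1)

-- ===== PRECONDITION & SPEC =====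
def Spec_find_uvw_whole_string (data_list : List String) (out : List Int) : Prop := out = find_uvw_whole_string_alt data_list
instance (data_list : List String) (out : List Int) : Decidable (Spec_find_uvw_whole_string data_list out) := by unfold Spec_find_uvw_whole_string; infer_instance

-- ===== CLAIM (what is proved, stated in full; the proofs are below) =====
def Claim_equal_find_uvw_whole_string : Prop := ∀ (data_list : List String), Dom_find_uvw_whole_string data_list → Spec_find_uvw_whole_string data_list (find_uvw_whole_string data_list)

-- ===== LEMMAS AND PROOFS =====

-- number of targets reachable: bits already in the mask, plus targets occurring in the rest
def uvwCnt (mask : Nat) (l : List Char) : Nat :=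
  (if mask % 2 = 1 ∨ 'u' ∈ l then 1 else 0) +
  (if mask / 2 % 2 = 1 ∨ 'v' ∈ l then 1 else 0) +
  (if mask / 4 % 2 = 1 ∨ 'w' ∈ l then 1 else 0)

set_option maxHeartbeats 1000000 in
lemma hasTwoAux_eq (l : List Char) : ∀ mask, mask = 0 ∨ mask = 1 ∨ mask = 2 ∨ mask = 4 →
    (hasTwoOfUvw mask l = true ↔ 2 ≤ uvwCnt mask l) := by
  induction l with
  | nil =>
    intro mask hm
    rcases hm with rfl | rfl | rfl | rfl <;> simp [hasTwoOfUvw, uvwCnt]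
  | cons c rest ih =>
    intro mask hm
    have ih0 := ih 0 (by decide)
    have ih1 := ih 1 (by decide)
    have ih2 := ih 2 (by decide)
    have ih4 := ih 4 (by decide)
    clear ih
    rcases hm with rfl | rfl | rfl | rfl <;>
      by_cases hu : c = 'u' <;> by_cases hv : c = 'v' <;> by_cases hw : c = 'w' <;>
      simp_all [hasTwoOfUvw, uvwMaskStep, uvwCnt] <;> split_ifs <;> simp_all <;> subst_eqs <;> simp_all

lemma foldl_append_ite_map {α β : Type} (p : α → Prop) [DecidablePred p] (f : α → β)
    (l : List α) (acc : List β) :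
    l.foldl (fun a x => if p x then a ++ [f x] else a) acc
      = acc ++ (l.filter (fun x => decide (p x))).map f := by
  induction l generalizing acc with
  | nil => simp
  | cons x xs ih =>
    by_cases h : p x <;> simp [List.filter, h, ih]

lemma filter_uvw_length (l : List Char) :
    ((['u', 'v', 'w'].filter (fun c => decide (c ∈ l))).length : Int)
      = (if 'u' ∈ l then (1 : Int) else 0) + (if 'v' ∈ l then 1 else 0) + (if 'w' ∈ l then 1 else 0) := by
  by_cases hu : 'u' ∈ l <;> by_cases hv : 'v' ∈ l <;> by_cases hw : 'w' ∈ l <;>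
    simp [List.filter, hu, hv, hw]

lemma inter_len_eq (l : List Char) :
    PySem.Set.len (PySem.Set.inter (PySem.Set.ofList l) (PySem.Set.ofList ['u', 'v', 'w']))
      = ((['u', 'v', 'w'].filter (fun c => decide (c ∈ l))).length : Int) := by
  have hperm : (PySem.Set.inter (PySem.Set.ofList l) (PySem.Set.ofList ['u', 'v', 'w'])).Perm
      (['u', 'v', 'w'].filter (fun c => decide (c ∈ l))) := by
    rw [List.perm_ext_iff_of_nodup
      (PySem.Set.nodup_inter _ _ (PySem.Set.nodup_ofList l))
      (List.Nodup.filter _ (by decide))]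
    intro a
    simp only [PySem.Set.mem_inter, PySem.Set.mem_ofList, List.mem_filter, decide_eq_true_eq]
    tauto
  simp [PySem.Set.len, hperm.length_eq]

lemma cond_iff (t : String) :
    (2 ≤ PySem.Set.len (PySem.Set.inter (PySem.Set.ofList t.toList) (PySem.Set.ofList ['u', 'v', 'w'])))
      ↔ hasTwoOfUvw 0 t.toList = true := by
  rw [hasTwoAux_eq _ 0 (Or.inl rfl), inter_len_eq, filter_uvw_length]
  simp only [uvwCnt]
  by_cases hu : 'u' ∈ t.toList <;> by_cases hv : 'v' ∈ t.toList <;> by_cases hw : 'w' ∈ t.toList <;>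
    simp [hu, hv, hw]

-- ===== VERDICT (by name: the statement is the Claim_ definition above) =====
theorem find_uvw_whole_string_spec : Claim_equal_find_uvw_whole_string := by
  intro data_list _
  unfold Spec_find_uvw_whole_string find_uvw_whole_string find_uvw_whole_string_alt
  rw [foldl_append_ite_map
      (fun p : Int × String =>
        2 ≤ PySem.Set.len (PySem.Set.inter (PySem.Set.ofList p.2.toList) (PySem.Set.ofList ['u','v','w'])))
      (fun p => p.1)]
  simp only [List.nil_append]
  congr 1
  apply List.filter_congr
  intro p _
  rw [Bool.eq_iff_iff, decide_eq_true_eq]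
  exact cond_iff p.2
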